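-- pv_equiv track=rewrite | github.com/mesheshe/CS-361 | python/test/test.py | func
-- ===== SOURCE A (Python) =====
-- def func(arr):
--     i, result, endVal = 0, 0, len(arr)
--     while i < endVal:# in range(endVal):
--         if arr[i] == 1:
--             result += arr[i]
--         else:
--             if len(arr) != i + 1 and arr[i+1] != 1:
--                 result += (arr[i]*arr[i+1])
--                 i+= 1
--             else:
--                 result += arr[i]
--         i+= 1
--     return result
-- ===== SOURCE B (Python) =====
-- def func(arr):
--     total = 0
--     i = 0
--     n = len(arr)
--     while i < n:
--         if arr[i] == 1:
--             total += 1
--             i += 1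
--         else:
--             j = i
--             while j < n and arr[j] != 1:
--                 j += 1
--             run = arr[i:j]
--             k = 0
--             while k + 1 < len(run):
--                 total += run[k] * run[k + 1]
--                 k += 2
--             if len(run) % 2 == 1:
--                 total += run[-1]
--             i = j
--     return total
-- ===== Notes on version B (the rewrite author's own statement) =====
-- stated objective: alternative
-- what changed: B partitions the array into maximal runs of non-1 values and sums each run pairwise (products of adjacent pairs plus an odd leftover), instead of A's single index loop with conditional skip-by-2.
import Mathlib
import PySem

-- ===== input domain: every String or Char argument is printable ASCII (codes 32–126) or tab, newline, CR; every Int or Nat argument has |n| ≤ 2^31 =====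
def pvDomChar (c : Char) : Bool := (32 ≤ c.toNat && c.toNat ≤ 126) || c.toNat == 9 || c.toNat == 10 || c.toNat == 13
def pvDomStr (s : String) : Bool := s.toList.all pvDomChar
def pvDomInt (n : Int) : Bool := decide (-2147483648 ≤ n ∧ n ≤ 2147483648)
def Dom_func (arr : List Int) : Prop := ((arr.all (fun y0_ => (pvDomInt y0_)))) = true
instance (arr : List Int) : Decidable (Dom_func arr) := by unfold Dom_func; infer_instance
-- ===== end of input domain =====

-- B is an alternative decomposition (runs of non-1 values summed pairwise), not faster; equivalence is exact and total.

-- ===== PORT A =====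
-- A's while loop over the index, skipping 2 after a product: recursion on the
-- list suffix from index i; branches in A's order.
def funcLoop : List Int → Int
  | [] => 0
  | x :: rest =>
    if x = 1 then x + funcLoop rest
    else
      match rest with
      | y :: rest2 =>
        if y ≠ 1 then x * y + funcLoop rest2
        else x + funcLoop (y :: rest2)
      | [] => x + funcLoop []

def func (arr : List Int) : Int := funcLoop arr

-- ===== PORT B =====
-- inner pairwise pass over one run: products of adjacent pairs stepping by 2,
-- plus the lone leftover element when the run length is odd
def runPairs : List Int → Int
  | x :: y :: rest => x * y + runPairs rest
  | [x] => x
  | [] => 0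

-- outer pass: a 1 contributes 1; otherwise take the maximal run of non-1 values,
-- sum it pairwise, and continue after the run
def func_alt (arr : List Int) : Int :=
  match arr with
  | [] => 0
  | x :: rest =>
    if x = 1 then 1 + func_alt rest
    else runPairs ((x :: rest).takeWhile (· ≠ 1))
         + func_alt ((x :: rest).dropWhile (· ≠ 1))
termination_by arr.length
decreasing_by
  · simp
  · simp only [List.dropWhile]
    split
    · exact Nat.lt_succ_of_le (List.length_dropWhile_le _ _)
    · simp_all

-- ===== PRECONDITION & SPEC =====
def Spec_func (arr : List Int) (out : Int) : Prop := out = func_alt arr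
instance (arr : List Int) (out : Int) : Decidable (Spec_func arr out) := by unfold Spec_func; infer_instance

-- ===== CLAIM (what is proved, stated in full; the proofs are below) =====
def Claim_equal_func : Prop := ∀ (arr : List Int), Dom_func arr → Spec_func arr (func arr)

-- ===== LEMMAS AND PROOFS =====

-- one unfolding step of B, valid on every list: the run/rest split absorbs into func_alt
theorem funcAlt_split (l : List Int) :
    runPairs (l.takeWhile (· ≠ 1)) + func_alt (l.dropWhile (· ≠ 1)) = func_alt l := by
  match l with
  | [] => simp [func_alt, runPairs]
  | z :: t =>
    by_cases hz : z = 1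
    · subst hz
      simp [List.takeWhile, List.dropWhile, runPairs]
    · rw [func_alt]
      simp [hz]

theorem funcLoop_eq_funcAlt (l : List Int) : funcLoop l = func_alt l := by
  induction l using funcLoop.induct with
  | case1 => simp [funcLoop, func_alt]
  | case2 rest ih =>
    conv_lhs => rw [funcLoop.eq_def]
    rw [func_alt]
    simp [ih]
  | case3 x hx y rest2 hy ih =>
    -- x ≠ 1, next y ≠ 1: A pairs them; B's run starts x :: y :: …
    rw [funcLoop, func_alt]
    have h1 : (decide (x ≠ 1)) = true := by simp [hx]
    have h2 : (decide (y ≠ 1)) = true := by simp [hy]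
    simp only [if_neg hx, if_pos hy, List.takeWhile, List.dropWhile, h1, h2, runPairs]
    rw [ih, ← funcAlt_split rest2]
    ring
  | case4 x hx y rest2 hy ih =>
    -- x ≠ 1, next is 1: A adds x alone; B's run is [x]
    rw [funcLoop, func_alt]
    have hy1 : y = 1 := by by_contra h; exact hy h
    subst hy1
    simp [hx, runPairs, ih, List.takeWhile, List.dropWhile]
  | case5 x hx =>
    -- x ≠ 1 and last element
    rw [funcLoop, func_alt]
    simp [hx, runPairs, funcLoop, List.takeWhile, List.dropWhile, func_alt]

-- ===== VERDICT (by name: the statement is the Claim_ definition above) =====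
theorem func_spec : Claim_equal_func := by
  intro arr _
  unfold Spec_func func
  exact funcLoop_eq_funcAlt arr
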